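-- pv_equiv track=rewrite | github.com/OoIIIIIIIIoO/cable_news_archive_analysis | topic_modelling.py | compute_topic_score
-- ===== SOURCE A (Python) =====
-- def compute_topic_score(string, topic_words):
--     score = 0
--     for word in string.split(' '):
--         if word in topic_words:
--             topic_rank = topic_words.index(word)
--             if (topic_rank ==0): score += 100 # main topic word always scored at index 0
--             if (topic_rank in range (1, 10)): score += 50
--             if (topic_rank in range (10, 20)): score += 40
--             if (topic_rank in range (20, 30)): score += 30
--             if (topic_rank in range (30, 40)): score += 20
--             if (topic_rank in range (40, len(topic_words) - 1)): score += 10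
--     return score
-- ===== SOURCE B (Python) =====
-- def compute_topic_score(string, topic_words):
--     # Different decomposition: count the string's words once into a dict, then
--     # walk the ranked topic list (first occurrences only) and add count * band points.
--     freq = {}
--     for w in string.split(' '):
--         freq[w] = freq.get(w, 0) + 1
--     n = len(topic_words)
--     score = 0
--     seen = set()
--     for i, w in enumerate(topic_words):
--         if w in seen:
--             continue  # only the first occurrence of a topic word carries its rank
--         seen.add(w)
--         if i == 0:
--             pts = 100
--         elif i < 10:
--             pts = 50
--         elif i < 20:
--             pts = 40
--         elif i < 30:
--             pts = 30
--         elif i < 40: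
--             pts = 20
--         elif i < n - 1:
--             pts = 10
--         else:
--             pts = 0
--         score += freq.get(w, 0) * pts
--     return score
-- ===== Notes on version B (the rewrite author's own statement) =====
-- stated objective: alternative
-- what changed: B counts the string's words once into a dict and then walks the ranked topic list with a seen-set (first occurrences only), adding count * band points per distinct topic word, instead of A's per-string-word membership test plus list.index scan.
import Mathlib
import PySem

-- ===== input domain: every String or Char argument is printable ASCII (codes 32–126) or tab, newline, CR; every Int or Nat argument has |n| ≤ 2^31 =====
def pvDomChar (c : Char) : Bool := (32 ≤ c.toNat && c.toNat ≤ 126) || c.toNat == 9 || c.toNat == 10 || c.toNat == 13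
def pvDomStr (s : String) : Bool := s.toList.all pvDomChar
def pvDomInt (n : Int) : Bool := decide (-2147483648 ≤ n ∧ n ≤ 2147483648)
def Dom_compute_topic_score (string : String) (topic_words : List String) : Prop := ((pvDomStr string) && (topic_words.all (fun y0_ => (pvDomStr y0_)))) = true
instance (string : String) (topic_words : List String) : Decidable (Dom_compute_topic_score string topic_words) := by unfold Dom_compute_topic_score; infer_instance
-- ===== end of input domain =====

-- B counts the string's words into a dict once and walks the ranked topic list (first
-- occurrences only), adding count * band points — instead of A's per-word membership
-- test and list.index scan; objective: alternative traversal (return value unchanged).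

-- ===== PORT A =====
def compute_topic_score (string : String) (topic_words : List String) : Int :=
  ((PySem.Str.split? string " ").getD []).foldl (fun score word =>
    if topic_words.contains word then
      match PySem.List.index? topic_words word with
      | some topic_rank =>
        score + (if topic_rank = 0 then 100 else 0)
              + (if 1 ≤ topic_rank ∧ topic_rank < 10 then 50 else 0)
              + (if 10 ≤ topic_rank ∧ topic_rank < 20 then 40 else 0)
              + (if 20 ≤ topic_rank ∧ topic_rank < 30 then 30 else 0)
              + (if 30 ≤ topic_rank ∧ topic_rank < 40 then 20 else 0)
              + (if 40 ≤ (topic_rank : Int) ∧ (topic_rank : Int) < (topic_words.length : Int) - 1 then 10 else 0)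
      | none => score   -- unreachable: word ∈ topic_words
    else score) 0

-- ===== PORT B =====
-- B's _points band table (the if/elif chain of Source B)
def pvPts (i n : Int) : Int :=
  if i = 0 then 100
  else if i < 10 then 50
  else if i < 20 then 40
  else if i < 30 then 30
  else if i < 40 then 20
  else if i < n - 1 then 10
  else 0

def compute_topic_score_alt (string : String) (topic_words : List String) : Int :=
  let words := (PySem.Str.split? string " ").getD []
  let freq := words.foldl (fun d w => d.modify w 0 (· + 1)) PySem.Dict.empty
  let n : Int := topic_words.length
  ((PySem.List.enumerate topic_words 0).foldl
    (fun (st : Int × PySem.Set String) p =>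
      if st.2.contains p.2 then st
      else (st.1 + freq.getD p.2 0 * pvPts p.1 n, st.2.add p.2))
    (0, PySem.Set.empty)).1

-- ===== PRECONDITION & SPEC =====
def Spec_compute_topic_score (string : String) (topic_words : List String) (out : Int) : Prop := out = compute_topic_score_alt string topic_words
instance (string : String) (topic_words : List String) (out : Int) : Decidable (Spec_compute_topic_score string topic_words out) := by unfold Spec_compute_topic_score; infer_instance

-- ===== CLAIM (what is proved, stated in full; the proofs are below) =====
def Claim_equal_compute_topic_score : Prop := ∀ (string : String) (topic_words : List String), Dom_compute_topic_score string topic_words → Spec_compute_topic_score string topic_words (compute_topic_score string topic_words)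

-- ===== LEMMAS AND PROOFS =====

-- score one word contributes in A: band points of its first rank, 0 if absent
def pvG (tws : List String) (w : String) : Int :=
  match PySem.List.index? tws w with
  | some r => pvPts (r : Int) (tws.length : Int)
  | none => 0

-- one enumerate term of B, with the word-counts of `words`
def pvT (tws words : List String) (p : Int × String) : Int :=
  if (PySem.List.slice tws (some 0) (some p.1)).contains p.2 then 0
  else ((words.count p.2 : Nat) : Int) * pvPts p.1 (tws.length : Int)

set_option maxHeartbeats 2000000 in
theorem pv_bands (r : Nat) (L : Int) :
    (if r = 0 then (100:Int) else 0)
      + (if 1 ≤ r ∧ r < 10 then 50 else 0)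
      + (if 10 ≤ r ∧ r < 20 then 40 else 0)
      + (if 20 ≤ r ∧ r < 30 then 30 else 0)
      + (if 30 ≤ r ∧ r < 40 then 20 else 0)
      + (if 40 ≤ (r : Int) ∧ (r : Int) < L - 1 then 10 else 0)
      = pvPts (r : Int) L := by
  unfold pvPts
  split_ifs <;> omega

theorem pv_A_sum (s : String) (tws : List String) :
    compute_topic_score s tws = (((PySem.Str.split? s " ").getD []).map (pvG tws)).sum := by
  unfold compute_topic_score
  have hbody : (fun (score : Int) (word : String) =>
      if tws.contains word then
        match PySem.List.index? tws word with
        | some topic_rank =>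
          score + (if topic_rank = 0 then 100 else 0)
                + (if 1 ≤ topic_rank ∧ topic_rank < 10 then 50 else 0)
                + (if 10 ≤ topic_rank ∧ topic_rank < 20 then 40 else 0)
                + (if 20 ≤ topic_rank ∧ topic_rank < 30 then 30 else 0)
                + (if 30 ≤ topic_rank ∧ topic_rank < 40 then 20 else 0)
                + (if 40 ≤ (topic_rank : Int) ∧ (topic_rank : Int) < (tws.length : Int) - 1 then 10 else 0)
        | none => score
      else score) = fun score word => score + pvG tws word := by
    funext score word
    unfold pvG
    cases h : PySem.List.index? tws word with
    | none =>
      have hmem : word ∉ tws := (PySem.List.index?_eq_none_iff tws word).mp h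
      simp [hmem]
    | some r =>
      have hmem : word ∈ tws := by
        by_contra hc
        rw [(PySem.List.index?_eq_none_iff tws word).mpr hc] at h
        cases h
      simp only [List.contains_iff_mem, hmem, if_pos]
      rw [← pv_bands r (tws.length : Int)]
      ring
  rw [hbody, PySem.List.foldl_add]
  simp

theorem pv_delta (L : Int) (w : String) :
    ∀ (rest pre : List String),
    ((PySem.List.enumerate rest ((pre.length : Nat) : Int)).map
       (fun p => if (PySem.List.slice (pre ++ rest) (some 0) (some p.1)).contains p.2 then 0
                 else (if p.2 = w then pvPts p.1 L else 0))).sum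
    = if w ∈ pre then 0 else
        (match PySem.List.index? rest w with
         | some r => pvPts (((pre.length + r : Nat)) : Int) L
         | none => 0) := by
  intro rest
  induction rest with
  | nil =>
    intro pre
    simp [PySem.List.enumerate, PySem.List.index?]
  | cons x rest ih =>
    intro pre
    rw [PySem.List.enumerate_cons, List.map_cons, List.sum_cons]
    have hslice : PySem.List.slice (pre ++ x :: rest) (some 0) (some ((pre.length : Nat) : Int)) = pre := by
      rw [PySem.List.slice_zero_start, PySem.List.slice_to_natCast, List.take_left]
    have htail := ih (pre ++ [x])
    have hpl : (((pre ++ [x]).length : Nat) : Int) = ((pre.length : Nat) : Int) + 1 := by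
      simp
    rw [hpl] at htail
    have happ : (pre ++ [x]) ++ rest = pre ++ x :: rest := by simp
    rw [happ] at htail
    rw [htail, hslice]
    by_cases hxw : x = w
    · subst hxw
      rw [PySem.List.index?_cons_self]
      have : x ∈ pre ++ [x] := by simp
      simp only [this, if_pos]
      by_cases hp : x ∈ pre
      · simp [hp]
      · simp [hp]
    · rw [PySem.List.index?_cons_of_ne rest hxw]
      have hmem : w ∈ pre ++ [x] ↔ w ∈ pre := by
        simp [Ne.symm hxw]
      rw [if_congr hmem rfl rfl]
      have hhead : (if pre.contains x then (0:Int) else if x = w then pvPts ((pre.length : Nat) : Int) L else 0) = 0 := by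
        simp [hxw]
      rw [hhead, zero_add]
      cases h : PySem.List.index? rest w with
      | none => simp
      | some r =>
        simp only [Option.map_some]
        have hlen : (pre ++ [x]).length + r = pre.length + (r + 1) := by
          simp [List.length_append]
          omega
        rw [hlen]
  
theorem pv_T_nil (tws : List String) :
    ((PySem.List.enumerate tws 0).map (pvT tws [])).sum = 0 := by
  apply List.sum_eq_zero
  intro x hx
  rcases List.mem_map.mp hx with ⟨p, _, rfl⟩
  simp [pvT]

theorem pv_main (tws : List String) :
    ∀ (words : List String),
    ((PySem.List.enumerate tws 0).map (pvT tws words)).sum = (words.map (pvG tws)).sum := by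
  intro words
  induction words with
  | nil => simpa using pv_T_nil tws
  | cons w ws ih =>
    have hpt : ∀ p : Int × String, pvT tws (w :: ws) p =
        pvT tws ws p + (if (PySem.List.slice tws (some 0) (some p.1)).contains p.2 then 0
                        else (if p.2 = w then pvPts p.1 (tws.length : Int) else 0)) := by
      intro p
      unfold pvT
      simp only [List.count_cons, PySem.List.slice_zero_start, List.contains_iff_mem]
      by_cases hc : p.2 ∈ PySem.List.slice tws none (some p.1)
      · simp [hc]
      · simp only [hc, if_false]
        by_cases hw : p.2 = w
        · subst hw
          split_ifs with h1 h2
          · push_cast; ring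
          · exact absurd rfl h2
          · exact absurd (by simp : (p.2 == p.2) = true) h1
          · exact absurd (by simp : (p.2 == p.2) = true) h1
        · have hb : (w == p.2) = false := by
            simp only [beq_eq_false_iff_ne, ne_eq]
            exact fun e => hw e.symm
          simp [hb, hw]
    calc ((PySem.List.enumerate tws 0).map (pvT tws (w :: ws))).sum
        = ((PySem.List.enumerate tws 0).map (fun p => pvT tws ws p
            + (if (PySem.List.slice tws (some 0) (some p.1)).contains p.2 then 0
               else (if p.2 = w then pvPts p.1 (tws.length : Int) else 0)))).sum := by
          congr 1
          exact List.map_congr_left (fun p _ => hpt p)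
      _ = ((PySem.List.enumerate tws 0).map (pvT tws ws)).sum
            + ((PySem.List.enumerate tws 0).map
                (fun p => if (PySem.List.slice tws (some 0) (some p.1)).contains p.2 then 0
                          else (if p.2 = w then pvPts p.1 (tws.length : Int) else 0))).sum :=
          PySem.List.sum_map_add_int _ _ _
      _ = (ws.map (pvG tws)).sum + pvG tws w := by
          rw [ih]
          congr 1
          refine (pv_delta (tws.length : Int) w tws []).trans ?_
          simp only [List.not_mem_nil, if_false]
          unfold pvG
          cases h : PySem.List.index? tws w <;> simp
      _ = ((w :: ws).map (pvG tws)).sum := by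
          rw [List.map_cons, List.sum_cons]; ring

-- the seen-set loop of B, against the prefix-slice formulation of the same sum
theorem pv_loop (f : Int × String → Int) :
    ∀ (rest pre : List String) (seen : PySem.Set String),
    (∀ v, v ∈ seen ↔ v ∈ pre) → ∀ (a : Int),
    ((PySem.List.enumerate rest ((pre.length : Nat) : Int)).foldl
      (fun (st : Int × PySem.Set String) p =>
        if st.2.contains p.2 then st
        else (st.1 + f p, st.2.add p.2)) (a, seen)).1
    = a + ((PySem.List.enumerate rest ((pre.length : Nat) : Int)).map
        (fun p => if (PySem.List.slice (pre ++ rest) (some 0) (some p.1)).contains p.2 then 0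
                  else f p)).sum := by
  intro rest
  induction rest with
  | nil =>
    intro pre seen hseen a
    simp [PySem.List.enumerate]
  | cons x rest ih =>
    intro pre seen hseen a
    rw [PySem.List.enumerate_cons, List.foldl_cons, List.map_cons, List.sum_cons]
    have hslice : PySem.List.slice (pre ++ x :: rest) (some 0) (some ((pre.length : Nat) : Int)) = pre := by
      rw [PySem.List.slice_zero_start, PySem.List.slice_to_natCast, List.take_left]
    rw [hslice]
    have hpl : (((pre ++ [x]).length : Nat) : Int) = ((pre.length : Nat) : Int) + 1 := by simp
    have happ : (pre ++ [x]) ++ rest = pre ++ x :: rest := by simp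
    by_cases hx : x ∈ pre
    · have h1 : (((a, seen) : Int × PySem.Set String)).2.contains x = true := by
        simpa using (hseen x).mpr hx
      have h2 : pre.contains x = true := by simpa using hx
      rw [if_pos h1, if_pos h2]
      have hmemiff : ∀ v, v ∈ seen ↔ v ∈ pre ++ [x] := by
        intro v
        rw [hseen v]
        constructor
        · exact fun h => List.mem_append_left _ h
        · intro h
          rcases List.mem_append.mp h with h' | h'
          · exact h'
          · rw [List.mem_singleton.mp h']; exact hx
      have htail := ih (pre ++ [x]) seen hmemiff a
      rw [hpl, happ] at htail
      rw [htail]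
      ring
    · have h1 : (((a, seen) : Int × PySem.Set String)).2.contains x = false := by
        simpa using fun h => hx ((hseen x).mp h)
      have h2 : pre.contains x = false := by simpa using hx
      rw [h1, if_neg (by simp), h2, if_neg (by simp)]
      have hmemiff : ∀ v, v ∈ seen.add x ↔ v ∈ pre ++ [x] := by
        intro v
        rw [PySem.Set.mem_add, hseen v]
        simp [List.mem_append]
      have htail := ih (pre ++ [x]) (seen.add x) hmemiff (a + f (((pre.length : Nat) : Int), x))
      rw [hpl, happ] at htail
      rw [htail]
      ring

theorem pv_B_sum (s : String) (tws : List String) :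
    compute_topic_score_alt s tws
      = ((PySem.List.enumerate tws 0).map (pvT tws ((PySem.Str.split? s " ").getD []))).sum := by
  unfold compute_topic_score_alt
  set words := (PySem.Str.split? s " ").getD [] with hwords
  have hfreq : words.foldl (fun d w => d.modify w 0 (· + 1)) PySem.Dict.empty = PySem.Dict.counter words := by
    rw [PySem.Dict.counter_eq_foldl]
  simp only [hfreq]
  have hloop := pv_loop
    (fun p => (PySem.Dict.counter words).getD p.2 0 * pvPts p.1 (tws.length : Int))
    tws [] PySem.Set.empty (fun v => by simp [PySem.Set.empty]) 0
  simp only [List.length_nil, Nat.cast_zero, List.nil_append, zero_add] at hloop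
  rw [hloop]
  refine congrArg List.sum ?_
  apply List.map_congr_left
  intro p _
  unfold pvT
  rw [PySem.Dict.getD_counter]
  rfl

-- ===== VERDICT (by name: the statement is the Claim_ definition above) =====
theorem compute_topic_score_spec : Claim_equal_compute_topic_score := by
  intro s tws _
  unfold Spec_compute_topic_score
  rw [pv_A_sum, pv_B_sum, pv_main]
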